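-- pv_equiv track=rewrite | github.com/carlos-gnw/ViernesToolkit | viernes_cli_single.py | render_preview
-- ===== SOURCE A (Python) =====
-- MENU_ITEMS = [
--     {"id": 1, "group": "L11 Tools", "label": "Activar K2V4"},
--     {"id": 2, "group": "L11 Tools", "label": "SW Autoconfig"},
--     {"id": 3, "group": "L11 Tools", "label": "Rack Information"},
--     {"id": 4, "group": "L11 Tools", "label": "PCIe Verification"},
--     {"id": 5, "group": "MLA Tools", "label": "Ejecutar UART Tool"},
--     {"id": 6, "group": "MLA Tools", "label": "Proxy Cards Check"},
--     {"id": 7, "group": "MLA Tools", "label": "Verificación de K2V5 card type"},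
--     {"id": 8, "group": "MLA Tools", "label": "Limpiar eventos (SEL Clear)"},
--     {"id": 9, "group": "MLA Tools", "label": "Mostrar Sensor List"},
--     {"id": 10, "group": "MLA Tools", "label": "Sel Clear + VPD"},
--     {"id": 11, "group": "MLA Tools", "label": "Imprimir FRU"},
--     {"id": 12, "group": "MLA Tools", "label": "Verificar BMC Network"},
--     {"id": 13, "group": "MLA Tools", "label": "Clear DHCP + VPD"},
--     {"id": 14, "group": "MLA Tools", "label": "Check IPV4 (extend)"},
--     {"id": 15, "group": "Power", "label": "BMC Reboot"},
--     {"id": 16, "group": "Power", "label": "Sol Activate"},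
--     {"id": 17, "group": "Debug", "label": "Issue TT2_K2V4_KEG_SYNC"},
--     {"id": 18, "group": "Others", "label": "Opinión/Sugerencias de Tools"},
--     {"id": 19, "group": "Others", "label": "Node Information | Buscar unidad"},
--     {"id": 99, "group": "Compatibilidad", "label": "Legacy Launcher (scripts originales)"},
--     {"id": 20, "group": "Sistema", "label": "Salir"},
-- ]
--
-- ASCII_TITLE = [
--     r" __      ___                           ",
--     r" \ \    / (_)            GNW Team      ",
--     r"  \ \  / / _  ___ _ __ _ __   ___  ___ ",
--     r"   \ \/ / | |/ _ \ '__| '_ \ / _ \/ __|",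
--     r"    \  /  | |  __/ |  | | | |  __/\__",
--     r"     \/   |_|\___|_|  |_| |_|\___||___/ ",
-- ]
--
-- def render_preview(title: str = "Viernes Toolkit CLI (Python | Single File)") -> str:
--     lines: list[str] = []
--     lines.extend(ASCII_TITLE)
--     lines.append(title)
--     lines.append("Usa ↑/↓ para navegar, Enter para seleccionar, q para salir.")
--     lines.append("")
--
--     current_group = None
--     for item in MENU_ITEMS:
--         group = item.get("group", "General")
--         if group != current_group:
--             current_group = group
--             lines.append(f"[{group}]")
--         lines.append(f"  {item['id']:>2}) {item['label']}")
--
--     lines.append("")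
--     lines.append("Nota: En ejecución real, el menú es interactivo con curses.")
--     return "\n".join(lines)
-- ===== SOURCE B (Python) =====
-- # The menu and banner are module constants, so the whole preview except the
-- # title is a fixed text: B keeps it as two pre-rendered template halves and
-- # splices the title between them (closed form instead of A's grouping loop).
--
-- _HEAD = " __      ___                           \n \\ \\    / (_)            GNW Team      \n  \\ \\  / / _  ___ _ __ _ __   ___  ___ \n   \\ \\/ / | |/ _ \\ '__| '_ \\ / _ \\/ __|\n    \\  /  | |  __/ |  | | | |  __/\\__\n     \\/   |_|\\___|_|  |_| |_|\\___||___/ "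
--
-- _TAIL = 'Usa ↑/↓ para navegar, Enter para seleccionar, q para salir.\n\n[L11 Tools]\n   1) Activar K2V4\n   2) SW Autoconfig\n   3) Rack Information\n   4) PCIe Verification\n[MLA Tools]\n   5) Ejecutar UART Tool\n   6) Proxy Cards Check\n   7) Verificación de K2V5 card type\n   8) Limpiar eventos (SEL Clear)\n   9) Mostrar Sensor List\n  10) Sel Clear + VPD\n  11) Imprimir FRU\n  12) Verificar BMC Network\n  13) Clear DHCP + VPD\n  14) Check IPV4 (extend)\n[Power]\n  15) BMC Reboot\n  16) Sol Activate\n[Debug]\n  17) Issue TT2_K2V4_KEG_SYNC\n[Others]\n  18) Opinión/Sugerencias de Tools\n  19) Node Information | Buscar unidad\n[Compatibilidad]\n  99) Legacy Launcher (scripts originales)\n[Sistema]\n  20) Salir\n\nNota: En ejecución real, el menú es interactivo con curses.'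
--
--
-- def render_preview(title: str = "Viernes Toolkit CLI (Python | Single File)") -> str:
--     return _HEAD + "\n" + title + "\n" + _TAIL
-- ===== Notes on version B (the rewrite author's own statement) =====
-- stated objective: alternative
-- what changed: The menu and banner are module constants, so B replaces A's per-call grouping loop with a closed form: the preview is stored as two pre-rendered template halves and render_preview just splices the title between them with newline separators.
import Mathlib
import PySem

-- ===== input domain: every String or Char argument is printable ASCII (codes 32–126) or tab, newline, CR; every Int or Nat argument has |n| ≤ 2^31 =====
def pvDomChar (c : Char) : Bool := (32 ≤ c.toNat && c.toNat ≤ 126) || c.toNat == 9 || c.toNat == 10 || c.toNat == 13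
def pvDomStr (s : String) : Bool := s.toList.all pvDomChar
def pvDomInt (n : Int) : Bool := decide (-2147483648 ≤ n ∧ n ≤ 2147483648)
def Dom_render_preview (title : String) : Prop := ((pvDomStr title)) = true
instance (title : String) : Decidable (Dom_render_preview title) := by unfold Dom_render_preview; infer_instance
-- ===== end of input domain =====

-- B replaces A's menu-grouping loop by a closed form: the menu is a module
-- constant, so B keeps the preview as two pre-rendered template halves and
-- splices the title between them (objective: alternative/simpler).

-- ===== PORT A =====
-- same-module constants of A
def pvMenuItems : List (Int × String × String) := [
  (1, "L11 Tools", "Activar K2V4"),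
  (2, "L11 Tools", "SW Autoconfig"),
  (3, "L11 Tools", "Rack Information"),
  (4, "L11 Tools", "PCIe Verification"),
  (5, "MLA Tools", "Ejecutar UART Tool"),
  (6, "MLA Tools", "Proxy Cards Check"),
  (7, "MLA Tools", "Verificación de K2V5 card type"),
  (8, "MLA Tools", "Limpiar eventos (SEL Clear)"),
  (9, "MLA Tools", "Mostrar Sensor List"),
  (10, "MLA Tools", "Sel Clear + VPD"),
  (11, "MLA Tools", "Imprimir FRU"),
  (12, "MLA Tools", "Verificar BMC Network"),
  (13, "MLA Tools", "Clear DHCP + VPD"),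
  (14, "MLA Tools", "Check IPV4 (extend)"),
  (15, "Power", "BMC Reboot"),
  (16, "Power", "Sol Activate"),
  (17, "Debug", "Issue TT2_K2V4_KEG_SYNC"),
  (18, "Others", "Opinión/Sugerencias de Tools"),
  (19, "Others", "Node Information | Buscar unidad"),
  (99, "Compatibilidad", "Legacy Launcher (scripts originales)"),
  (20, "Sistema", "Salir")]

def pvAsciiTitle : List String := [
  " __      ___                           ",
  " \\ \\    / (_)            GNW Team      ",
  "  \\ \\  / / _  ___ _ __ _ __   ___  ___ ",
  "   \\ \\/ / | |/ _ \\ '__| '_ \\ / _ \\/ __|",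
  "    \\  /  | |  __/ |  | | | |  __/\\__",
  "     \\/   |_|\\___|_|  |_| |_|\\___||___/ "]

-- f"  {id:>2}) {label}": str(id) right-justified to width 2 (hand port, exact: pad one
-- space iff str(id) is a single character, which covers Python's '>2' format here)
def pvItemLine (id : Int) (label : String) : String :=
  let s := PySem.Int.toStr id
  "  " ++ (if PySem.Str.len s < 2 then " " ++ s else s) ++ ") " ++ label

-- A's loop body, named (the for-loop over MENU_ITEMS with state (lines, current_group))
def pvStepA (st : List String × Option String) (item : Int × String × String) : List String × Option String :=
  let group := item.2.1
  let st := if st.2 ≠ some group then (st.1 ++ ["[" ++ group ++ "]"], some group) else st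
  (st.1 ++ [pvItemLine item.1 item.2.2], st.2)

def render_preview (title : String) : String :=
  let lines : List String :=
    pvAsciiTitle
      ++ [title, "Usa ↑/↓ para navegar, Enter para seleccionar, q para salir.", ""]
  let st := pvMenuItems.foldl pvStepA (lines, none)
  PySem.Str.join "\n"
    (st.1 ++ ["", "Nota: En ejecución real, el menú es interactivo con curses."])

-- ===== PORT B =====
-- Source B's module constants _HEAD and _TAIL (pre-rendered template halves)
def pvHead : String := " __      ___                           \n \\ \\    / (_)            GNW Team      \n  \\ \\  / / _  ___ _ __ _ __   ___  ___ \n   \\ \\/ / | |/ _ \\ '__| '_ \\ / _ \\/ __|\n    \\  /  | |  __/ |  | | | |  __/\\__\n     \\/   |_|\\___|_|  |_| |_|\\___||___/ "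

def pvTail : String := "Usa ↑/↓ para navegar, Enter para seleccionar, q para salir.\n\n[L11 Tools]\n   1) Activar K2V4\n   2) SW Autoconfig\n   3) Rack Information\n   4) PCIe Verification\n[MLA Tools]\n   5) Ejecutar UART Tool\n   6) Proxy Cards Check\n   7) Verificación de K2V5 card type\n   8) Limpiar eventos (SEL Clear)\n   9) Mostrar Sensor List\n  10) Sel Clear + VPD\n  11) Imprimir FRU\n  12) Verificar BMC Network\n  13) Clear DHCP + VPD\n  14) Check IPV4 (extend)\n[Power]\n  15) BMC Reboot\n  16) Sol Activate\n[Debug]\n  17) Issue TT2_K2V4_KEG_SYNC\n[Others]\n  18) Opinión/Sugerencias de Tools\n  19) Node Information | Buscar unidad\n[Compatibilidad]\n  99) Legacy Launcher (scripts originales)\n[Sistema]\n  20) Salir\n\nNota: En ejecución real, el menú es interactivo con curses."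

def render_preview_alt (title : String) : String :=
  pvHead ++ "\n" ++ title ++ "\n" ++ pvTail

-- ===== PRECONDITION & SPEC =====
def Spec_render_preview (title : String) (out : String) : Prop := out = render_preview_alt title
instance (title : String) (out : String) : Decidable (Spec_render_preview title out) := by unfold Spec_render_preview; infer_instance

-- ===== CLAIM (what is proved, stated in full; the proofs are below) =====
def Claim_equal_render_preview : Prop := ∀ (title : String), Dom_render_preview title → Spec_render_preview title (render_preview title)

-- ===== LEMMAS AND PROOFS =====

-- one step of A's loop only appends to the accumulated lines
theorem pvStepA_fst (init : List String) (cur : Option String) (a : Int × String × String) :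
    pvStepA (init, cur) a = (init ++ (pvStepA ([], cur) a).1, (pvStepA ([], cur) a).2) := by
  simp only [pvStepA]
  split_ifs <;> simp

-- hence the initial lines factor out of the whole fold
theorem pvFoldA_pull (l : List (Int × String × String)) :
    ∀ (init : List String) (cur : Option String),
      (l.foldl pvStepA (init, cur)).1 = init ++ (l.foldl pvStepA ([], cur)).1 := by
  induction l with
  | nil => intro init cur; simp
  | cons a l ih =>
    intro init cur
    rw [List.foldl_cons, List.foldl_cons, pvStepA_fst init cur a]
    rw [ih]
    conv_rhs => rw [← Prod.mk.eta (p := pvStepA ([], cur) a), ih]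
    simp

-- the lines A's menu loop produces, as a literal list (closed computation)
set_option maxRecDepth 40000 in
set_option maxHeartbeats 1000000 in
theorem pvBodyA_eq :
    (pvMenuItems.foldl pvStepA ([], none)).1 = [
        "[L11 Tools]",
        "   1) Activar K2V4",
        "   2) SW Autoconfig",
        "   3) Rack Information",
        "   4) PCIe Verification",
        "[MLA Tools]",
        "   5) Ejecutar UART Tool",
        "   6) Proxy Cards Check",
        "   7) Verificación de K2V5 card type",
        "   8) Limpiar eventos (SEL Clear)",
        "   9) Mostrar Sensor List",
        "  10) Sel Clear + VPD",
        "  11) Imprimir FRU",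
        "  12) Verificar BMC Network",
        "  13) Clear DHCP + VPD",
        "  14) Check IPV4 (extend)",
        "[Power]",
        "  15) BMC Reboot",
        "  16) Sol Activate",
        "[Debug]",
        "  17) Issue TT2_K2V4_KEG_SYNC",
        "[Others]",
        "  18) Opinión/Sugerencias de Tools",
        "  19) Node Information | Buscar unidad",
        "[Compatibilidad]",
        "  99) Legacy Launcher (scripts originales)",
        "[Sistema]",
        "  20) Salir"] := by
  decide

-- sep.join over a list split around one element t (both sides nonempty)
theorem pvJoinMid (sep t : List Char) :
    ∀ (l1 l2 : List (List Char)), l1 ≠ [] → l2 ≠ [] →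
      PySem.Chars.join sep (l1 ++ t :: l2)
        = PySem.Chars.join sep l1 ++ sep ++ t ++ sep ++ PySem.Chars.join sep l2 := by
  intro l1
  induction l1 with
  | nil => intro l2 h _; exact absurd rfl h
  | cons a l1 ih =>
    intro l2 _ h2
    cases l1 with
    | nil =>
      cases l2 with
      | nil => exact absurd rfl h2
      | cons c l2' =>
        rw [List.singleton_append, PySem.Chars.join_cons_cons, PySem.Chars.join_cons_cons]
        simp [PySem.Chars.join_singleton, List.append_assoc]
    | cons b l1' =>
      have h := ih l2 (by simp) h2
      rw [List.cons_append] at h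
      rw [List.cons_append, List.cons_append, PySem.Chars.join_cons_cons, h,
          PySem.Chars.join_cons_cons]
      simp [List.append_assoc]

-- ===== VERDICT (by name: the statement is the Claim_ definition above) =====
set_option maxRecDepth 40000 in
set_option maxHeartbeats 1000000 in
theorem render_preview_spec : Claim_equal_render_preview := by
  intro title _
  unfold Spec_render_preview
  simp only [render_preview, render_preview_alt]
  rw [pvFoldA_pull pvMenuItems, pvBodyA_eq]
  rw [← String.toList_inj]
  rw [PySem.Str.toList_join]
  have hsplit :
      List.map String.toList
          (pvAsciiTitle
            ++ [title, "Usa ↑/↓ para navegar, Enter para seleccionar, q para salir.", ""]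
            ++ ([
        "[L11 Tools]",
        "   1) Activar K2V4",
        "   2) SW Autoconfig",
        "   3) Rack Information",
        "   4) PCIe Verification",
        "[MLA Tools]",
        "   5) Ejecutar UART Tool",
        "   6) Proxy Cards Check",
        "   7) Verificación de K2V5 card type",
        "   8) Limpiar eventos (SEL Clear)",
        "   9) Mostrar Sensor List",
        "  10) Sel Clear + VPD",
        "  11) Imprimir FRU",
        "  12) Verificar BMC Network",
        "  13) Clear DHCP + VPD",
        "  14) Check IPV4 (extend)",
        "[Power]",
        "  15) BMC Reboot",
        "  16) Sol Activate",
        "[Debug]",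
        "  17) Issue TT2_K2V4_KEG_SYNC",
        "[Others]",
        "  18) Opinión/Sugerencias de Tools",
        "  19) Node Information | Buscar unidad",
        "[Compatibilidad]",
        "  99) Legacy Launcher (scripts originales)",
        "[Sistema]",
        "  20) Salir"])
            ++ ["", "Nota: En ejecución real, el menú es interactivo con curses."])
        = List.map String.toList pvAsciiTitle
            ++ title.toList
              :: List.map String.toList
                  (["Usa ↑/↓ para navegar, Enter para seleccionar, q para salir.", ""]
                    ++ ([
        "[L11 Tools]",
        "   1) Activar K2V4",
        "   2) SW Autoconfig",
        "   3) Rack Information",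
        "   4) PCIe Verification",
        "[MLA Tools]",
        "   5) Ejecutar UART Tool",
        "   6) Proxy Cards Check",
        "   7) Verificación de K2V5 card type",
        "   8) Limpiar eventos (SEL Clear)",
        "   9) Mostrar Sensor List",
        "  10) Sel Clear + VPD",
        "  11) Imprimir FRU",
        "  12) Verificar BMC Network",
        "  13) Clear DHCP + VPD",
        "  14) Check IPV4 (extend)",
        "[Power]",
        "  15) BMC Reboot",
        "  16) Sol Activate",
        "[Debug]",
        "  17) Issue TT2_K2V4_KEG_SYNC",
        "[Others]",
        "  18) Opinión/Sugerencias de Tools",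
        "  19) Node Information | Buscar unidad",
        "[Compatibilidad]",
        "  99) Legacy Launcher (scripts originales)",
        "[Sistema]",
        "  20) Salir"])
                    ++ ["", "Nota: En ejecución real, el menú es interactivo con curses."]) := by
    simp [pvAsciiTitle]
  rw [hsplit, pvJoinMid _ _ _ _ (by simp [pvAsciiTitle]) (by simp)]
  have hhead : PySem.Chars.join ("\n".toList) (List.map String.toList pvAsciiTitle)
      = pvHead.toList := by decide
  have htail : PySem.Chars.join ("\n".toList)
        (List.map String.toList
          (["Usa ↑/↓ para navegar, Enter para seleccionar, q para salir.", ""]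
            ++ ([
        "[L11 Tools]",
        "   1) Activar K2V4",
        "   2) SW Autoconfig",
        "   3) Rack Information",
        "   4) PCIe Verification",
        "[MLA Tools]",
        "   5) Ejecutar UART Tool",
        "   6) Proxy Cards Check",
        "   7) Verificación de K2V5 card type",
        "   8) Limpiar eventos (SEL Clear)",
        "   9) Mostrar Sensor List",
        "  10) Sel Clear + VPD",
        "  11) Imprimir FRU",
        "  12) Verificar BMC Network",
        "  13) Clear DHCP + VPD",
        "  14) Check IPV4 (extend)",
        "[Power]",
        "  15) BMC Reboot",
        "  16) Sol Activate",
        "[Debug]",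
        "  17) Issue TT2_K2V4_KEG_SYNC",
        "[Others]",
        "  18) Opinión/Sugerencias de Tools",
        "  19) Node Information | Buscar unidad",
        "[Compatibilidad]",
        "  99) Legacy Launcher (scripts originales)",
        "[Sistema]",
        "  20) Salir"])
            ++ ["", "Nota: En ejecución real, el menú es interactivo con curses."]))
      = pvTail.toList := by decide
  rw [hhead, htail]
  simp
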